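-- pv_equiv track=rewrite | github.com/CodyAdam/aoc-2025 | 10.py | bfs
-- ===== SOURCE A (Python) =====
-- def bfs(code, buttons, n):
--     cache = set()
--     # bfs
--     queue = [(code, 0)]
--     while queue:
--         current_code, i = queue.pop(0)
--         if current_code == 0:
--             return i
--         for button in buttons:
--             new_code = current_code ^ button
--             if new_code in cache:
--                 continue
--             cache.add(new_code)
--             queue.append((new_code, i + 1))
--     return -1
-- ===== SOURCE B (Python) =====
-- def bfs(code, buttons, n):
--     # set-algebra BFS: expand the whole frontier at once with a set comprehension,
--     # take a set difference against visited; no queue, no per-node distance tags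
--     frontier = {code}
--     visited = set()
--     depth = 0
--     while frontier:
--         if 0 in frontier:
--             return depth
--         frontier = {x ^ b for x in frontier for b in buttons} - visited
--         visited |= frontier
--         depth += 1
--     return -1
-- ===== Notes on version B (the rewrite author's own statement) =====
-- stated objective: alternative
-- what changed: Replaced the FIFO queue of (node, distance) pairs popped one at a time with set algebra: each level the whole frontier set is expanded by one set comprehension and a set difference against visited, with a single depth counter and no per-node tags or queue.
import Mathlib
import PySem

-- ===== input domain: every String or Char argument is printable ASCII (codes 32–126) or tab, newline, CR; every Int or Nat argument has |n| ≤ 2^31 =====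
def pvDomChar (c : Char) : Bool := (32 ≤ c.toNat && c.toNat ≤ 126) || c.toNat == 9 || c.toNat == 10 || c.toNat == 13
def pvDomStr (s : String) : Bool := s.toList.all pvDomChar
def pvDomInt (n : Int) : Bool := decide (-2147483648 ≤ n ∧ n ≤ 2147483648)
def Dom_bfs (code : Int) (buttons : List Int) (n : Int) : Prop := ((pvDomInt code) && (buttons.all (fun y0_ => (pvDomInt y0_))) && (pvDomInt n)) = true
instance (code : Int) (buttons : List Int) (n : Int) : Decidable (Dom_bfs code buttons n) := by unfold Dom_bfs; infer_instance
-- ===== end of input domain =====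

-- B replaces A's FIFO queue of tagged (node, distance) pairs by set algebra: each level the
-- whole frontier set is expanded at once and differenced against visited (objective: alternative).

-- ===== PORT A =====
-- inner 'for button in buttons' body of A, acting on (cache, queue)
def bfsStepA (buttons : List Int) (cc i : Int) (st : PySem.Set Int × List (Int × Int)) :
    PySem.Set Int × List (Int × Int) :=
  buttons.foldl (fun st b =>
    let nc := PySem.Int.bxor cc b
    if PySem.Set.contains st.1 nc then st
    else (PySem.Set.add st.1 nc, st.2 ++ [(nc, i + 1)])) st

-- A's 'while queue' loop; fuel only makes the recursion total (2^|buttons|+2 provably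
-- exceeds the number of iterations, see bfs_loops_agree below), none is never reached
def bfsLoopA (buttons : List Int) (fuel : Nat) (cache : PySem.Set Int)
    (queue : List (Int × Int)) : Option Int :=
  match queue with
  | [] => some (-1)
  | (cc, i) :: rest =>
    match fuel with
    | 0 => none
    | fuel + 1 =>
      if cc = 0 then some i
      else
        let st := bfsStepA buttons cc i (cache, rest)
        bfsLoopA buttons fuel st.1 st.2

def bfs (code : Int) (buttons : List Int) (n : Int) : Int :=
  (bfsLoopA buttons (2 ^ buttons.length + 2) PySem.Set.empty [(code, 0)]).getD (-1)

-- ===== PORT B =====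
-- B's 'while frontier' loop: one set comprehension + set difference per level; the
-- candidate set membership is order-independent, so flatMap over the frontier is exact.
-- Same fuel-totality guard as in port A; none is never reached.
def bfsLoopB (buttons : List Int) (fuel : Nat) (visited frontier : PySem.Set Int)
    (depth : Int) : Option Int :=
  match frontier with
  | [] => some (-1)
  | _ :: _ =>
    match fuel with
    | 0 => none
    | fuel + 1 =>
      if PySem.Set.contains frontier 0 then some depth
      else
        let nf := PySem.Set.diff
          (PySem.Set.ofList (frontier.flatMap (fun x => buttons.map (fun b => PySem.Int.bxor x b))))
          visited
        bfsLoopB buttons fuel (PySem.Set.union visited nf) nf (depth + 1)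

def bfs_alt (code : Int) (buttons : List Int) (n : Int) : Int :=
  (bfsLoopB buttons (2 ^ buttons.length + 2) PySem.Set.empty (PySem.Set.ofList [code]) 0).getD (-1)

-- ===== PRECONDITION & SPEC =====
def Spec_bfs (code : Int) (buttons : List Int) (n : Int) (out : Int) : Prop := out = bfs_alt code buttons n
instance (code : Int) (buttons : List Int) (n : Int) (out : Int) : Decidable (Spec_bfs code buttons n out) := by unfold Spec_bfs; infer_instance

-- ===== CLAIM (what is proved, stated in full; the proofs are below) =====
def Claim_equal_bfs : Prop := ∀ (code : Int) (buttons : List Int) (n : Int), Dom_bfs code buttons n → Spec_bfs code buttons n (bfs code buttons n)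

-- ===== LEMMAS AND PROOFS =====

-- Two's-complement encoding (s, m) ↦ if s then -m-1 else m, to transport Nat.xor facts to bxor
def pvEnc (s : Bool) (m : Nat) : Int := if s then -(m : Int) - 1 else (m : Int)

lemma pvEnc_surj (a : Int) :
    a = pvEnc (decide (a < 0)) (if 0 ≤ a then a.toNat else (-a - 1).toNat) := by
  by_cases h : 0 ≤ a <;> simp [pvEnc, h] <;> omega

lemma bxor_pvEnc (s1 s2 : Bool) (m1 m2 : Nat) :
    PySem.Int.bxor (pvEnc s1 m1) (pvEnc s2 m2) = pvEnc (s1 ^^ s2) (m1 ^^^ m2) := by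
  have e1 : (-(-(m1 : Int) - 1) - 1) = (m1 : Int) := by ring
  have e2 : (-(-(m2 : Int) - 1) - 1) = (m2 : Int) := by ring
  cases s1 <;> cases s2 <;>
    simp only [pvEnc, Bool.xor_false, Bool.xor_true, if_true, if_false,
      PySem.Int.bxor, Bool.false_eq_true, Bool.true_eq_false, ite_true, ite_false]
  · rw [if_pos (by omega), if_pos (by omega)]; simp
  · rw [if_pos (by omega), if_neg (by omega), e2]; simp
  · rw [if_neg (by omega), if_pos (by omega), e1]; simp
  · rw [if_neg (by omega), if_neg (by omega), e1, e2]; simp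

lemma bxor_assoc (a b c : Int) :
    PySem.Int.bxor (PySem.Int.bxor a b) c = PySem.Int.bxor a (PySem.Int.bxor b c) := by
  rw [pvEnc_surj a, pvEnc_surj b, pvEnc_surj c]
  simp only [bxor_pvEnc, Bool.xor_assoc, Nat.xor_assoc]

lemma bxor_cancel (a b : Int) : PySem.Int.bxor (PySem.Int.bxor a b) b = a := by
  rw [bxor_assoc, PySem.Int.bxor_self, PySem.Int.bxor_zero]

-- the (finite) list of all values reachable from `code` by XOR-ing buttons
def pvReach (code : Int) : List Int → List Int
  | [] => [code]
  | b :: bs => pvReach code bs ++ (pvReach code bs).map (fun v => PySem.Int.bxor v b)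

lemma pvReach_code_mem (code : Int) (bs : List Int) : code ∈ pvReach code bs := by
  induction bs with
  | nil => simp [pvReach]
  | cons b bs ih => simp [pvReach]; left; exact ih

lemma pvReach_length (code : Int) (bs : List Int) :
    (pvReach code bs).length = 2 ^ bs.length := by
  induction bs with
  | nil => rfl
  | cons b bs ih => simp [pvReach, ih]; ring

lemma pvReach_closed (code : Int) (bs : List Int) (b : Int) :
    b ∈ bs → ∀ v ∈ pvReach code bs, PySem.Int.bxor v b ∈ pvReach code bs := by
  induction bs with
  | nil => intro hb; simp at hb
  | cons b' bs ih =>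
    intro hb v hv
    simp only [pvReach, List.mem_append, List.mem_map] at hv ⊢
    rcases List.mem_cons.mp hb with hb' | hb'
    · subst hb'
      rcases hv with hv | ⟨u, hu, rfl⟩
      · exact Or.inr ⟨v, hv, rfl⟩
      · exact Or.inl (by rw [bxor_cancel]; exact hu)
    · rcases hv with hv | ⟨u, hu, rfl⟩
      · exact Or.inl (ih hb' v hv)
      · refine Or.inr ⟨PySem.Int.bxor u b, ih hb' u hu, ?_⟩
        rw [bxor_assoc, bxor_assoc, PySem.Int.bxor_comm b' b]

-- proof-only helper: the untagged analogue of A's inner button loop, acting on (cache, fresh)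
def pvBtn (buttons : List Int) (x : Int) (st : PySem.Set Int × List Int) :
    PySem.Set Int × List Int :=
  buttons.foldl (fun st b =>
    let nc := PySem.Int.bxor x b
    if PySem.Set.contains st.1 nc then st
    else (PySem.Set.add st.1 nc, st.2 ++ [nc])) st

-- A's inner button loop is pvBtn with '(·, i+1)' tags appended after P
lemma stepA_eq_pvBtn (buttons : List Int) (cc i : Int) :
    ∀ (V : PySem.Set Int) (P : List (Int × Int)) (Δ : List Int),
    bfsStepA buttons cc i (V, P ++ Δ.map (fun v => (v, i + 1)))
      = ((pvBtn buttons cc (V, Δ)).1,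
         P ++ ((pvBtn buttons cc (V, Δ)).2).map (fun v => (v, i + 1))) := by
  induction buttons with
  | nil => intro V P Δ; simp [bfsStepA, pvBtn]
  | cons b bs ih =>
    intro V P Δ
    simp only [bfsStepA, pvBtn, List.foldl_cons] at *
    by_cases h : PySem.Set.contains V (PySem.Int.bxor cc b)
    · simp only [h, if_true]; exact ih V P Δ
    · simp only [h, if_false, Bool.false_eq_true]
      have := ih (PySem.Set.add V (PySem.Int.bxor cc b)) P (Δ ++ [PySem.Int.bxor cc b])
      simpa [List.append_assoc] using this

lemma contains_iff (s : PySem.Set Int) (x : Int) :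
    PySem.Set.contains s x = true ↔ x ∈ s := by
  simp [PySem.Set.contains]

-- pvBtn appends the same fresh block to visited and to the output; the block is exactly
-- the candidates x^b that are not already in V
lemma pvBtn_sync (buttons : List Int) (x : Int) :
    ∀ (V : PySem.Set Int) (Δ : List Int), V.Nodup →
    ∃ t, pvBtn buttons x (V, Δ) = (V ++ t, Δ ++ t) ∧ (V ++ t).Nodup ∧
      (∀ v ∈ t, (∃ b ∈ buttons, v = PySem.Int.bxor x b) ∧ v ∉ V) ∧
      (∀ b ∈ buttons, PySem.Int.bxor x b ∈ V ++ t) := by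
  induction buttons with
  | nil => intro V Δ hn; exact ⟨[], by simp [pvBtn], by simpa, by simp, by simp⟩
  | cons b bs ih =>
    intro V Δ hn
    simp only [pvBtn, List.foldl_cons] at ih ⊢
    by_cases h : PySem.Set.contains V (PySem.Int.bxor x b)
    · simp only [h, if_true]
      obtain ⟨t, h1, h2, h3, h4⟩ := ih V Δ hn
      refine ⟨t, h1, h2, ?_, ?_⟩
      · intro v hv
        obtain ⟨⟨b', hb', rfl⟩, hnv⟩ := h3 v hv
        exact ⟨⟨b', List.mem_cons_of_mem _ hb', rfl⟩, hnv⟩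
      · intro b' hb'
        rcases List.mem_cons.mp hb' with rfl | hb'
        · exact List.mem_append.mpr (Or.inl ((contains_iff V _).mp h))
        · exact h4 b' hb'
    · simp only [h, if_false, Bool.false_eq_true]
      have hnc : PySem.Int.bxor x b ∉ V := fun hm => h ((contains_iff V _).mpr hm)
      have hadd : PySem.Set.add V (PySem.Int.bxor x b) = V ++ [PySem.Int.bxor x b] := by
        simp [PySem.Set.add, h, hnc]
      rw [hadd]
      have hn' : (V ++ [PySem.Int.bxor x b]).Nodup := by
        exact hn.append (List.nodup_singleton _) (List.disjoint_singleton.mpr hnc)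
      obtain ⟨t, h1, h2, h3, h4⟩ := ih (V ++ [PySem.Int.bxor x b]) (Δ ++ [PySem.Int.bxor x b]) hn'
      refine ⟨PySem.Int.bxor x b :: t, ?_, ?_, ?_, ?_⟩
      · rw [h1]; simp
      · simpa using h2
      · intro v hv
        rcases List.mem_cons.mp hv with rfl | hv'
        · refine ⟨⟨b, List.mem_cons_self, rfl⟩, hnc⟩
        · obtain ⟨⟨b', hb', rfl⟩, hnv⟩ := h3 v hv'
          exact ⟨⟨b', List.mem_cons_of_mem _ hb', rfl⟩, fun hm => hnv (by simp [hm])⟩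
      · intro b' hb'
        rcases List.mem_cons.mp hb' with rfl | hb'
        · simp
        · have := h4 b' hb'
          simp only [List.append_assoc, List.singleton_append] at this
          exact this

-- one whole level (fold of pvBtn over the frontier) appends the same fresh block to
-- visited and to the output; the block is exactly the level's candidates not already in V
lemma pvLevel_sync (buttons : List Int) :
    ∀ (F : List Int) (V : PySem.Set Int) (Δ : List Int), V.Nodup →
    ∃ t, F.foldl (fun st x => pvBtn buttons x st) (V, Δ) = (V ++ t, Δ ++ t) ∧
      (V ++ t).Nodup ∧
      (∀ v ∈ t, (∃ x ∈ F, ∃ b ∈ buttons, v = PySem.Int.bxor x b) ∧ v ∉ V) ∧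
      (∀ x ∈ F, ∀ b ∈ buttons, PySem.Int.bxor x b ∈ V ++ t) := by
  intro F
  induction F with
  | nil => intro V Δ hn; exact ⟨[], by simp, by simpa, by simp, by simp⟩
  | cons x F' ih =>
    intro V Δ hn
    simp only [List.foldl_cons]
    obtain ⟨t1, h1, hn1, h3, h4⟩ := pvBtn_sync buttons x V Δ hn
    rw [h1]
    obtain ⟨t2, g1, gn, g3, g4⟩ := ih (V ++ t1) (Δ ++ t1) hn1
    refine ⟨t1 ++ t2, ?_, ?_, ?_, ?_⟩
    · rw [g1]; simp
    · simpa using gn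
    · intro v hv
      rcases List.mem_append.mp hv with hv1 | hv2
      · obtain ⟨⟨b, hb, rfl⟩, hnv⟩ := h3 v hv1
        exact ⟨⟨x, List.mem_cons_self, b, hb, rfl⟩, hnv⟩
      · obtain ⟨⟨x', hx', b, hb, rfl⟩, hnv⟩ := g3 _ hv2
        exact ⟨⟨x', List.mem_cons_of_mem _ hx', b, hb, rfl⟩, fun hm => hnv (by simp [hm])⟩
    · intro x' hx' b hb
      rcases List.mem_cons.mp hx' with rfl | hx'
      · have := h4 b hb
        rcases List.mem_append.mp this with h | h
        · simp [h]
        · simp [h]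
      · have := g4 x' hx' b hb
        simpa [List.append_assoc] using this

lemma loopA_nil (buttons : List Int) (f : Nat) (V : PySem.Set Int) :
    bfsLoopA buttons f V [] = some (-1) := by cases f <;> rfl

lemma loopB_nil (buttons : List Int) (f : Nat) (V : PySem.Set Int) (d : Int) :
    bfsLoopB buttons f V [] d = some (-1) := by cases f <;> rfl

lemma loopB_cons (buttons : List Int) (f : Nat) (VB : PySem.Set Int) (y : Int)
    (R : List Int) (d : Int) :
    bfsLoopB buttons (f + 1) VB (y :: R) d
      = if PySem.Set.contains (y :: R) 0 then some d
        else
          bfsLoopB buttons f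
            (PySem.Set.union VB (PySem.Set.diff
              (PySem.Set.ofList ((y :: R).flatMap (fun x => buttons.map (fun b => PySem.Int.bxor x b)))) VB))
            (PySem.Set.diff
              (PySem.Set.ofList ((y :: R).flatMap (fun x => buttons.map (fun b => PySem.Int.bxor x b)))) VB)
            (d + 1) := rfl

-- if 0 is in the current level, A returns the level's tag
lemma loopA_found (buttons : List Int) (i : Int) :
    ∀ (F : List Int), (0 : Int) ∈ F → ∀ (f : Nat) (V : PySem.Set Int) (G : List (Int × Int)),
    bfsLoopA buttons (f + F.length) V (F.map (fun x => (x, i)) ++ G) = some i := by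
  intro F
  induction F with
  | nil => intro h; simp at h
  | cons x F' ih =>
    intro h0 f V G
    have hfe : f + (x :: F').length = (f + F'.length) + 1 := by simp; omega
    rw [hfe]
    by_cases hx : x = 0
    · subst hx; simp [bfsLoopA]
    · simp only [List.map_cons, List.cons_append, bfsLoopA, hx, if_false]
      have h0' : (0 : Int) ∈ F' := by
        rcases List.mem_cons.mp h0 with h | h
        · exact absurd h.symm hx
        · exact h
      have := stepA_eq_pvBtn buttons x i V (F'.map (fun x => (x, i)) ++ G) []
      simp only [List.map_nil, List.append_nil] at this
      rw [this]
      rw [List.append_assoc]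
      exact ih h0' f _ _

-- if 0 is not in the current level, A processes the whole level and continues
-- with exactly the (visited, fresh) pair the level fold computes
lemma loopA_level (buttons : List Int) (i : Int) :
    ∀ (F : List Int), (∀ x ∈ F, x ≠ 0) → ∀ (f : Nat) (V : PySem.Set Int) (Δ : List Int),
    bfsLoopA buttons (f + F.length) V
        (F.map (fun x => (x, i)) ++ Δ.map (fun v => (v, i + 1)))
      = bfsLoopA buttons f (F.foldl (fun st x => pvBtn buttons x st) (V, Δ)).1
          (((F.foldl (fun st x => pvBtn buttons x st) (V, Δ)).2).map (fun v => (v, i + 1))) := by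
  intro F
  induction F with
  | nil => intro _ f V Δ; simp
  | cons x F' ih =>
    intro hz f V Δ
    have hfe : f + (x :: F').length = (f + F'.length) + 1 := by simp; omega
    rw [hfe]
    have hx : x ≠ 0 := hz x List.mem_cons_self
    simp only [List.map_cons, List.cons_append, bfsLoopA, hx, if_false, List.foldl_cons]
    have := stepA_eq_pvBtn buttons x i V (F'.map (fun x => (x, i))) Δ
    rw [this]
    exact ih (fun y hy => hz y (List.mem_cons_of_mem _ hy)) f _ _

lemma nodup_length_le (V R : List Int) (h : V.Nodup) (hs : ∀ v ∈ V, v ∈ R) :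
    V.length ≤ R.length := ((List.subperm_of_subset h hs).length_le)

-- the main correspondence: A's tagged queue at a level boundary, and B's set-algebra loop
-- on any visited/frontier sets with the SAME MEMBERS, compute the same answer
lemma bfs_loops_agree (code : Int) (buttons : List Int) :
    ∀ (fB fA : Nat) (V F : List Int) (VB FB : PySem.Set Int) (d : Int),
    V.Nodup →
    (∀ v : Int, v ∈ V ↔ v ∈ VB) →
    (∀ v : Int, v ∈ F ↔ v ∈ FB) →
    (∀ v ∈ V, v ∈ pvReach code buttons) → (∀ x ∈ F, x ∈ pvReach code buttons) →
    F.length + ((pvReach code buttons).length - V.length) ≤ fA →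
    1 + ((pvReach code buttons).length - V.length) ≤ fB →
    bfsLoopA buttons fA V (F.map (fun x => (x, d))) = bfsLoopB buttons fB VB FB d := by
  intro fB
  induction fB with
  | zero => intro fA V F VB FB d _ _ _ _ _ _ hB; omega
  | succ fB ih =>
    intro fA V F VB FB d hnd hVB hFB hVR hFR hA hB
    match F, hFB, hFR, hA with
    | [], hFB, hFR, hA =>
      have hFBnil : FB = [] := by
        apply List.eq_nil_iff_forall_not_mem.mpr
        intro v hv
        exact (List.not_mem_nil (a := v)) ((hFB v).mpr hv)
      simp only [List.map_nil, hFBnil]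
      rw [loopA_nil, loopB_nil]
    | x :: F', hFB, hFR, hA =>
      have hxFB : x ∈ FB := (hFB x).mp List.mem_cons_self
      match FB, hFB, hxFB with
      | y :: R, hFB, _ =>
        have hc0 : ((0:Int) ∈ x :: F') ↔ ((0:Int) ∈ y :: R) := hFB 0
        by_cases hc : (0 : Int) ∈ x :: F'
        · have hfa : fA = (fA - (x :: F').length) + (x :: F').length := by
            simp at hA ⊢; omega
          rw [hfa]
          have := loopA_found buttons d (x :: F') hc (fA - (x :: F').length) V []
          simp only [List.append_nil] at this
          rw [this, loopB_cons, if_pos ((contains_iff _ _).mpr (hc0.mp hc))]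
        · have hz : ∀ z ∈ x :: F', z ≠ 0 := fun z hz hz0 => hc (hz0 ▸ hz)
          have hfa : fA = (fA - (x :: F').length) + (x :: F').length := by
            simp at hA ⊢; omega
          rw [hfa]
          have hlev := loopA_level buttons d (x :: F') hz (fA - (x :: F').length) V []
          simp only [List.map_nil, List.append_nil] at hlev
          rw [hlev]
          obtain ⟨t, hfold, hnt, ht, htc⟩ := pvLevel_sync buttons (x :: F') V [] hnd
          simp only [List.nil_append] at hfold
          rw [hfold]
          have hcB : PySem.Set.contains (y :: R) (0:Int) ≠ true := by
            intro h
            exact hc (hc0.mpr ((contains_iff _ _).mp h))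
          rw [loopB_cons, if_neg hcB]
          set nf := PySem.Set.diff
            (PySem.Set.ofList ((y :: R).flatMap (fun x => buttons.map (fun b => PySem.Int.bxor x b)))) VB with hnf
          -- t and nf have the same members
          have hmem : ∀ v : Int, v ∈ t ↔ v ∈ nf := by
            intro v
            rw [hnf, PySem.Set.mem_diff, PySem.Set.mem_ofList, List.mem_flatMap]
            constructor
            · intro hv
              obtain ⟨⟨x', hx', b, hb, rfl⟩, hnv⟩ := ht v hv
              refine ⟨⟨x', (hFB x').mp hx', ?_⟩, fun h => hnv ((hVB _).mpr h)⟩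
              exact List.mem_map.mpr ⟨b, hb, rfl⟩
            · rintro ⟨⟨x', hx', hm⟩, hnv⟩
              obtain ⟨b, hb, rfl⟩ := List.mem_map.mp hm
              have hxF : x' ∈ x :: F' := (hFB x').mpr hx'
              have := htc x' hxF b hb
              rcases List.mem_append.mp this with h | h
              · exact absurd ((hVB _).mp h) hnv
              · exact h
          have hVB' : ∀ v : Int, v ∈ V ++ t ↔ v ∈ PySem.Set.union VB nf := by
            intro v
            rw [List.mem_append, PySem.Set.mem_union]
            exact or_congr (hVB v) (hmem v)
          rcases t with _ | ⟨v0, t'⟩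
          · have hnfnil : nf = [] := by
              apply List.eq_nil_iff_forall_not_mem.mpr
              intro v hv
              exact (List.not_mem_nil (a := v)) ((hmem v).mpr hv)
            simp only [List.append_nil, List.map_nil, hnfnil]
            rw [loopA_nil, loopB_nil]
          · -- fresh block nonempty: visited strictly grows, both fuels suffice
            have htR : ∀ v ∈ v0 :: t', v ∈ pvReach code buttons := by
              intro v hv
              obtain ⟨⟨z, hz', b, hb, rfl⟩, _⟩ := ht v hv
              exact pvReach_closed code buttons b hb z (hFR z hz')
            have hVR' : ∀ v ∈ V ++ (v0 :: t'), v ∈ pvReach code buttons := by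
              intro v hv
              rcases List.mem_append.mp hv with h | h
              · exact hVR v h
              · exact htR v h
            have hcard : (V ++ (v0 :: t')).length ≤ (pvReach code buttons).length :=
              nodup_length_le _ _ hnt hVR'
            have hcard' : V.length + (t'.length + 1) ≤ (pvReach code buttons).length := by
              simpa using hcard
            refine ih (fA - (x :: F').length) (V ++ (v0 :: t')) (v0 :: t')
              (PySem.Set.union VB nf) nf (d + 1) hnt hVB' hmem hVR' htR ?_ ?_
            · simp only [List.length_append, List.length_cons]
              simp only [List.length_cons] at hA
              omega
            · simp only [List.length_append, List.length_cons]
              omega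

-- ===== VERDICT (by name: the statement is the Claim_ definition above) =====
theorem bfs_spec : Claim_equal_bfs := by
  intro code buttons n _
  unfold Spec_bfs bfs bfs_alt
  rw [show (PySem.Set.empty : PySem.Set Int) = ([] : List Int) from rfl]
  have hc : PySem.Set.ofList [code] = [code] := by
    simp [PySem.Set.ofList, PySem.Set.add, PySem.Set.contains, PySem.Set.empty]
  rw [hc]
  have h := bfs_loops_agree code buttons (2 ^ buttons.length + 2) (2 ^ buttons.length + 2)
    [] [code] [] [code] 0 List.nodup_nil (by simp) (by simp)
    (by simp)
    (by intro x hx; rw [List.mem_singleton] at hx; rw [hx]; exact pvReach_code_mem code buttons)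
    (by simp [pvReach_length]; omega) (by simp [pvReach_length]; omega)
  simp only [List.map_cons, List.map_nil] at h
  rw [h]
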